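-- pv_equiv track=rewrite | github.com/312labxiaol/soil_sampe | management_units.py | find_nearest_point_in_quadrant
-- ===== SOURCE A (Python) =====
-- def find_nearest_point_in_quadrant(reference_point, candidate_points, quadrant):
--     """
--     在给定象限中找到离参考点最近的点
--
--     参数:
--         reference_point: 参考点坐标
--         candidate_points: 候选点列表
--         quadrant: 象限编号 (1-右上, 2-左上, 3-左下, 4-右下)
--
--     返回:
--         最近的点或None
--     """
--     nearest_point = None
--     min_distance = float('inf')
--
--     for point in candidate_points:
--         dx = point[0] - reference_point[0]
--         dy = point[1] - reference_point[1]
--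
--         # 检查点是否在指定象限
--         if ((quadrant == 1 and dx >= 0 and dy >= 0) or  # 右上
--             (quadrant == 2 and dx <= 0 and dy >= 0) or  # 左上
--             (quadrant == 3 and dx <= 0 and dy <= 0) or  # 左下
--             (quadrant == 4 and dx >= 0 and dy <= 0)):   # 右下
--
--             distance = dx*dx + dy*dy
--             if distance < min_distance:
--                 min_distance = distance
--                 nearest_point = point
--
--     return nearest_point
-- ===== SOURCE B (Python) =====
-- _SIGNS = {1: (1, 1), 2: (-1, 1), 3: (-1, -1), 4: (1, -1)}
--
-- def find_nearest_point_in_quadrant(reference_point, candidate_points, quadrant):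
--     if quadrant not in _SIGNS:
--         return None
--     sx, sy = _SIGNS[quadrant]
--     rx, ry = reference_point
--     for point in sorted(candidate_points,
--                         key=lambda p: (p[0] - rx) ** 2 + (p[1] - ry) ** 2):
--         if sx * (point[0] - rx) >= 0 and sy * (point[1] - ry) >= 0:
--             return point
--     return None
-- ===== Notes on version B (the rewrite author's own statement) =====
-- stated objective: alternative
-- what changed: B presorts the candidates by squared distance (Python's stable sort) and returns the first sorted point passing a sign-table quadrant test via an early-exit scan, instead of A's single accumulator loop tracking the running nearest point and minimum distance.
import Mathlib
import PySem

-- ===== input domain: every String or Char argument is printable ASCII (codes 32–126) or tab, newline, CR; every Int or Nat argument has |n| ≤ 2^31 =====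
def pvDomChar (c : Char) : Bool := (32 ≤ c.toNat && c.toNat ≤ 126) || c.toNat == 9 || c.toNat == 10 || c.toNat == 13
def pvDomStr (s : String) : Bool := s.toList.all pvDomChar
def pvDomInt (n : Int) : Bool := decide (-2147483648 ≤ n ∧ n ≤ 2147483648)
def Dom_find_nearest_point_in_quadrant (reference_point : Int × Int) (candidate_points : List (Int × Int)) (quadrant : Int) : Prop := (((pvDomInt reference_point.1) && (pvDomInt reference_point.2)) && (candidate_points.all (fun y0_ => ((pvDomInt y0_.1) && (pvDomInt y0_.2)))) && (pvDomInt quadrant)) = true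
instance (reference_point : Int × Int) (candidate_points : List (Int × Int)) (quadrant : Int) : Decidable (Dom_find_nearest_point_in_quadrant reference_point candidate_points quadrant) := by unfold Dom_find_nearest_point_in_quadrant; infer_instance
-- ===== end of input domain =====

-- B replaces A's accumulator loop (running nearest point + min distance) by a different
-- algorithm: stable-sort the candidates by squared distance, then return the first sorted
-- point passing a sign-table quadrant test (objective: alternative; sort costs O(n log n)).

-- ===== PORT A =====
-- Python's min_distance starts at float('inf'); since every computed distance is an Int,
-- the state's second component models it as Option Int with none = inf (exact: the first
-- in-quadrant point always satisfies distance < inf, as in Python).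
def find_nearest_point_in_quadrant (reference_point : Int × Int) (candidate_points : List (Int × Int)) (quadrant : Int) : Option (Int × Int) :=
  (candidate_points.foldl
    (fun (st : Option (Int × Int) × Option Int) point =>
      let dx := point.1 - reference_point.1
      let dy := point.2 - reference_point.2
      if ((quadrant == 1 && decide (dx ≥ 0) && decide (dy ≥ 0)) ||
          (quadrant == 2 && decide (dx ≤ 0) && decide (dy ≥ 0)) ||
          (quadrant == 3 && decide (dx ≤ 0) && decide (dy ≤ 0)) ||
          (quadrant == 4 && decide (dx ≥ 0) && decide (dy ≤ 0))) then
        let distance := dx * dx + dy * dy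
        if (match st.2 with | none => true | some m => decide (distance < m)) then
          (some point, some distance)
        else st
      else st)
    (none, none)).1

-- ===== PORT B =====
-- sorted(..., key=...) → PySem.List.sorted (stable); the early-exit for-loop over the
-- sorted list returning the first in-quadrant point → List.find?.
def find_nearest_point_in_quadrant_alt (reference_point : Int × Int) (candidate_points : List (Int × Int)) (quadrant : Int) : Option (Int × Int) :=
  let signs : PySem.Dict Int (Int × Int) :=
    PySem.Dict.ofList [(1, (1, 1)), (2, (-1, 1)), (3, (-1, -1)), (4, (1, -1))]
  match signs.get? quadrant with
  | none => none
  | some (sx, sy) =>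
    let rx := reference_point.1
    let ry := reference_point.2
    (PySem.List.sorted candidate_points (fun p => (p.1 - rx) ^ 2 + (p.2 - ry) ^ 2)).find?
      (fun p => decide (sx * (p.1 - rx) ≥ 0) && decide (sy * (p.2 - ry) ≥ 0))

-- ===== PRECONDITION & SPEC =====
def Spec_find_nearest_point_in_quadrant (reference_point : Int × Int) (candidate_points : List (Int × Int)) (quadrant : Int) (out : Option (Int × Int)) : Prop := out = find_nearest_point_in_quadrant_alt reference_point candidate_points quadrant
instance (reference_point : Int × Int) (candidate_points : List (Int × Int)) (quadrant : Int) (out : Option (Int × Int)) : Decidable (Spec_find_nearest_point_in_quadrant reference_point candidate_points quadrant out) := by unfold Spec_find_nearest_point_in_quadrant; infer_instance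

-- ===== CLAIM (what is proved, stated in full; the proofs are below) =====
def Claim_equal_find_nearest_point_in_quadrant : Prop := ∀ (reference_point : Int × Int) (candidate_points : List (Int × Int)) (quadrant : Int), Dom_find_nearest_point_in_quadrant reference_point candidate_points quadrant → Spec_find_nearest_point_in_quadrant reference_point candidate_points quadrant (find_nearest_point_in_quadrant reference_point candidate_points quadrant)

-- ===== LEMMAS AND PROOFS =====

-- A's loop over the filtered points, with the invariant that min_distance is the key of the
-- current nearest point, computes exactly PySem.List.min?'s left fold.
theorem pv_loop_min {α : Type} (key : α → Int) (l : List α) (a : Option α) :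
    l.foldl
      (fun (st : Option α × Option Int) x =>
        if (match st.2 with | none => true | some m => decide (key x < m)) then
          (some x, some (key x))
        else st)
      (a, a.map key)
    = (l.foldl
        (fun acc x =>
          match acc with
          | none => some x
          | some m => if key x < key m then some x else some m) a,
       (l.foldl
        (fun acc x =>
          match acc with
          | none => some x
          | some m => if key x < key m then some x else some m) a).map key) := by
  induction l generalizing a with
  | nil => simp
  | cons x t ih =>
    cases a with
    | none =>
      simpa using ih (some x)
    | some p =>
      by_cases h : key x < key p
      · simpa [h] using ih (some x)
      · simpa [h] using ih (some p)

-- Inserting x into a key-sorted list: the first pred-element of the result is x exactly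
-- when pred x holds and x's key beats the previous first pred-element's key strictly.
theorem pv_find_insertBy {α : Type} (key : α → Int) (pred : α → Bool) (x : α) (s : List α)
    (hs : s.Pairwise (fun a b => key a ≤ key b)) :
    (PySem.List.insertBy (fun a b => decide (key a < key b)) x s).find? pred
      = match s.find? pred with
        | none => if pred x then some x else none
        | some m => if pred x && decide (key x < key m) then some x else some m := by
  induction s with
  | nil => cases hp : pred x <;> simp [PySem.List.insertBy, List.find?, hp]
  | cons y t ih =>
    rcases List.pairwise_cons.mp hs with ⟨hy, ht⟩
    by_cases hlt : key x < key y
    · -- x goes in front: insertBy = x :: y :: t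
      have hins : PySem.List.insertBy (fun a b => decide (key a < key b)) x (y :: t)
          = x :: y :: t := by simp [PySem.List.insertBy, hlt]
      rw [hins]
      cases hf : (y :: t).find? pred with
      | none =>
        cases hp : pred x <;> simp [hp, hf]
      | some m =>
        have hm : m = y ∨ m ∈ t := by
          have := List.mem_of_find?_eq_some hf
          simpa using this
        have hxm : key x < key m := by
          rcases hm with h | h
          · simpa [h] using hlt
          · exact lt_of_lt_of_le hlt (hy m h)
        cases hp : pred x <;> simp [hp, hf, hxm]
    · -- x goes after y: insertBy = y :: insertBy x t
      have hins : PySem.List.insertBy (fun a b => decide (key a < key b)) x (y :: t)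
          = y :: PySem.List.insertBy (fun a b => decide (key a < key b)) x t := by
        simp [PySem.List.insertBy, hlt]
      rw [hins]
      by_cases hp : pred y
      · have hyx : ¬ key x < key y := hlt
        simp [hp, hyx]
      · simp only [List.find?_cons]
        simp only [hp]
        exact ih ht

-- The first pred-element of the distance-sorted list is the pred-element of minimal key,
-- first in original order among ties (stability) — i.e. min? of the filtered list.
theorem pv_find_sorted_eq_min_filter {α : Type} (key : α → Int) (pred : α → Bool) (l : List α) :
    (PySem.List.sorted l key).find? pred = PySem.List.min? (l.filter pred) key := by
  induction l using List.reverseRecOn with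
  | nil => simp [PySem.List.sorted, PySem.List.min?]
  | append_singleton l x ih =>
    have hsorted : PySem.List.sorted (l ++ [x]) key
        = PySem.List.insertBy (fun a b => decide (key a < key b)) x (PySem.List.sorted l key) := by
      rw [PySem.List.sorted_eq_foldl_insertBy, PySem.List.sorted_eq_foldl_insertBy,
        List.foldl_append]
      rfl
    rw [hsorted,
      pv_find_insertBy key pred x _ (PySem.List.sorted_pairwise l key), ih]
    unfold PySem.List.min?
    rw [List.filter_append, List.foldl_append]
    have hr : ∀ (r : Option α),
        (match r with
          | none => if pred x then some x else none
          | some m => if pred x && decide (key x < key m) then some x else some m)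
        = List.foldl
            (fun acc x =>
              match acc with
              | none => some x
              | some m => if key x < key m then some x else some m) r
            (if pred x then [x] else []) := by
      intro r
      cases hp : pred x <;> cases r <;> simp
    rw [hr]
    congr 1
    cases hp : pred x <;> simp [List.filter, hp]

theorem find_nearest_point_in_quadrant_eq_alt (reference_point : Int × Int)
    (candidate_points : List (Int × Int)) (quadrant : Int) :
    find_nearest_point_in_quadrant reference_point candidate_points quadrant
      = find_nearest_point_in_quadrant_alt reference_point candidate_points quadrant := by
  obtain ⟨rx, ry⟩ := reference_point
  set key : Int × Int → Int := fun p => (p.1 - rx) ^ 2 + (p.2 - ry) ^ 2 with hkey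
  have hstep : ∀ (predB : Int × Int → Bool),
      (∀ p : Int × Int,
        ((quadrant == 1 && decide (p.1 - rx ≥ 0) && decide (p.2 - ry ≥ 0)) ||
         (quadrant == 2 && decide (p.1 - rx ≤ 0) && decide (p.2 - ry ≥ 0)) ||
         (quadrant == 3 && decide (p.1 - rx ≤ 0) && decide (p.2 - ry ≤ 0)) ||
         (quadrant == 4 && decide (p.1 - rx ≥ 0) && decide (p.2 - ry ≤ 0))) = predB p) →
      find_nearest_point_in_quadrant (rx, ry) candidate_points quadrant
        = PySem.List.min? (candidate_points.filter predB) key := by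
    intro predB hpred
    unfold find_nearest_point_in_quadrant
    have hbody :
        (fun (st : Option (Int × Int) × Option Int) (point : Int × Int) =>
          let dx := point.1 - rx
          let dy := point.2 - ry
          if ((quadrant == 1 && decide (dx ≥ 0) && decide (dy ≥ 0)) ||
              (quadrant == 2 && decide (dx ≤ 0) && decide (dy ≥ 0)) ||
              (quadrant == 3 && decide (dx ≤ 0) && decide (dy ≤ 0)) ||
              (quadrant == 4 && decide (dx ≥ 0) && decide (dy ≤ 0))) then
            let distance := dx * dx + dy * dy
            if (match st.2 with | none => true | some m => decide (distance < m)) then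
              (some point, some distance)
            else st
          else st)
        = (fun st point =>
            if predB point then
              (if (match st.2 with | none => true | some m => decide (key point < m)) then
                (some point, some (key point))
              else st)
            else st) := by
      funext st point
      have hk : (point.1 - rx) * (point.1 - rx) + (point.2 - ry) * (point.2 - ry) = key point := by
        simp [hkey]; ring
      simp only [← hpred point, hk]
    rw [hbody, ← List.foldl_filter]
    have := pv_loop_min key (candidate_points.filter predB) none
    simp only [Option.map_none] at this
    rw [this]
    rfl
  have halt : ∀ (sx sy : Int),
      (PySem.Dict.ofList [((1 : Int), ((1 : Int), (1 : Int))), (2, (-1, 1)), (3, (-1, -1)), (4, (1, -1))]).get? quadrant = some (sx, sy) →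
      find_nearest_point_in_quadrant_alt (rx, ry) candidate_points quadrant
        = (PySem.List.sorted candidate_points key).find?
            (fun p => decide (sx * (p.1 - rx) ≥ 0) && decide (sy * (p.2 - ry) ≥ 0)) := by
    intro sx sy hget
    unfold find_nearest_point_in_quadrant_alt
    simp only [hget, hkey]
  by_cases h1 : quadrant = 1
  · subst h1
    rw [hstep (fun p => decide ((1 : Int) * (p.1 - rx) ≥ 0) && decide ((1 : Int) * (p.2 - ry) ≥ 0))
        (by intro p; simp [one_mul]), halt 1 1 rfl, pv_find_sorted_eq_min_filter]
  · by_cases h2 : quadrant = 2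
    · subst h2
      rw [hstep (fun p => decide ((-1 : Int) * (p.1 - rx) ≥ 0) && decide ((1 : Int) * (p.2 - ry) ≥ 0))
          (by intro p; simp [one_mul]), halt (-1) 1 rfl, pv_find_sorted_eq_min_filter]
    · by_cases h3 : quadrant = 3
      · subst h3
        rw [hstep (fun p => decide ((-1 : Int) * (p.1 - rx) ≥ 0) && decide ((-1 : Int) * (p.2 - ry) ≥ 0))
            (by intro p; simp), halt (-1) (-1) rfl, pv_find_sorted_eq_min_filter]
      · by_cases h4 : quadrant = 4
        · subst h4
          rw [hstep (fun p => decide ((1 : Int) * (p.1 - rx) ≥ 0) && decide ((-1 : Int) * (p.2 - ry) ≥ 0))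
              (by intro p; simp [one_mul]), halt 1 (-1) rfl, pv_find_sorted_eq_min_filter]
        · -- quadrant outside 1..4: A's condition is always false, B's lookup misses
          have hA : find_nearest_point_in_quadrant (rx, ry) candidate_points quadrant
              = PySem.List.min? (candidate_points.filter (fun _ => false)) key := by
            refine hstep (fun _ => false) ?_
            intro p
            simp [h1, h2, h3, h4]
          have hB : find_nearest_point_in_quadrant_alt (rx, ry) candidate_points quadrant = none := by
            unfold find_nearest_point_in_quadrant_alt
            have e1 : ((1 : Int) == quadrant) = false := by rw [beq_eq_false_iff_ne]; omega
            have e2 : ((2 : Int) == quadrant) = false := by rw [beq_eq_false_iff_ne]; omega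
            have e3 : ((3 : Int) == quadrant) = false := by rw [beq_eq_false_iff_ne]; omega
            have e4 : ((4 : Int) == quadrant) = false := by rw [beq_eq_false_iff_ne]; omega
            have hget : (PySem.Dict.ofList [((1 : Int), ((1 : Int), (1 : Int))), (2, (-1, 1)), (3, (-1, -1)), (4, (1, -1))]).get? quadrant = none := by
              simp [PySem.Dict.ofList, PySem.Dict.get?, PySem.Dict.update, PySem.Dict.insert,
                PySem.Dict.empty, List.find?, e1, e2, e3, e4]
            simp only [hget]
          rw [hA, hB]
          simp [PySem.List.min?]

-- ===== VERDICT (by name: the statement is the Claim_ definition above) =====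
theorem find_nearest_point_in_quadrant_spec : Claim_equal_find_nearest_point_in_quadrant := by
  intro reference_point candidate_points quadrant _
  exact find_nearest_point_in_quadrant_eq_alt reference_point candidate_points quadrant
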